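-- pv_equiv track=rewrite | github.com/woose28/TIL | PS/Python/implementation/Programmers_둘만의_암호.py | solution
-- ===== SOURCE A (Python) =====
-- def solution(s, skip, index):
--     answer = ''
--
--     skipList = [ ord(char) - 97 for char in skip ]
--
--     for char in s:
--         moveCount = 0
--         currentChar = ord(char) - 97
--
--         while moveCount < index:
--             newChar = (currentChar + 1) % 26
--
--             if not newChar in skipList:
--                 moveCount += 1
--             currentChar = newChar
--
--
--         answer += chr(currentChar + 97)
--
--     return answer
-- ===== SOURCE B (Python) =====
-- def solution(s, skip, index):
--     if index <= 0:
--         return s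
--     allowed = [k for k in range(26) if chr(k + 97) not in skip]
--     out = []
--     for ch in s:
--         start = (ord(ch) - 97) % 26
--         j = sum(1 for k in allowed if k <= start)
--         out.append(chr(allowed[(j + index - 1) % len(allowed)] + 97))
--     return ''.join(out)
-- ===== Notes on version B (the rewrite author's own statement) =====
-- stated objective: faster
-- what changed: A advances each character one alphabet step at a time (index loop iterations per character, each scanning skipList); B precomputes the allowed-letter list once and jumps each character directly to its target letter with one rank computation and a modular index.
import Mathlib
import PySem

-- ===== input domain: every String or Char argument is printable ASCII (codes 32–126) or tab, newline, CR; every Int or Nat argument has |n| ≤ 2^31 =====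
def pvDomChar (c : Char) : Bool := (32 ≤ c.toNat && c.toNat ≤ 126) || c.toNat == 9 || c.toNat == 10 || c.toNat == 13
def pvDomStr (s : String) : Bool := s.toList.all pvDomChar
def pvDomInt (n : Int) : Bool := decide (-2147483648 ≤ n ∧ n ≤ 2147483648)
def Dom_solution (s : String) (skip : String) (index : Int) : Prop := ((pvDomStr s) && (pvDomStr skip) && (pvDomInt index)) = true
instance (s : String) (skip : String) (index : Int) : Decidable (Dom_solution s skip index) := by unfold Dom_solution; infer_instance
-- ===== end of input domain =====

-- B replaces A's step-by-step letter walk by a precomputed allowed-letter list and one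
-- modular jump per character (objective: faster).

-- ===== PORT A =====
-- A's inner while loop; the fuel argument only makes the recursion total (one unit per
-- Python loop iteration; the amount passed below suffices on every input Pre_ admits)
def pvALoop (skipList : List Int) (index : Int) : Nat → Int → Int → Int
  | 0, _, currentChar => currentChar
  | fuel + 1, moveCount, currentChar =>
    if moveCount < index then
      let newChar := PySem.Int.mod (currentChar + 1) 26
      let moveCount' := if skipList.contains newChar then moveCount else moveCount + 1
      pvALoop skipList index fuel moveCount' newChar
    else currentChar

def solution (s : String) (skip : String) (index : Int) : String :=
  let skipList : List Int := skip.toList.map (fun char => (char.toNat : Int) - 97)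
  let answer : List Char := s.toList.foldl (fun acc char =>
    let currentChar : Int := (char.toNat : Int) - 97
    let final := pvALoop skipList index (26 * index + 26).toNat 0 currentChar
    acc ++ [Char.ofNat (final + 97).toNat]) []
  String.ofList answer

-- ===== PORT B =====
def pvAllowed (skip : String) : List Int :=
  (PySem.List.pyRange 0 26 1).filter (fun k => ¬ skip.toList.contains (Char.ofNat (k + 97).toNat))

def solution_alt (s : String) (skip : String) (index : Int) : String :=
  if index ≤ 0 then s
  else
    let allowed := pvAllowed skip
    let out : List Char := s.toList.map (fun ch =>
      let start := PySem.Int.mod ((ch.toNat : Int) - 97) 26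
      let j : Int := (allowed.filter (fun k => k ≤ start)).length
      Char.ofNat (allowed.getD (PySem.Int.mod (j + index - 1) (allowed.length : Int)).toNat 0 + 97).toNat)
    String.ofList out

-- ===== PRECONDITION & SPEC =====
-- Pre_ excludes exactly the inputs on which A never returns: with index ≥ 1 and every
-- lowercase letter present in skip, A's inner while loop spins forever.
def Pre_solution (s : String) (skip : String) (index : Int) : Prop :=
  index ≤ 0 ∨ ∃ k ∈ List.range 26, Char.ofNat (97 + k) ∉ skip.toList
instance (s : String) (skip : String) (index : Int) : Decidable (Pre_solution s skip index) := by
  unfold Pre_solution; infer_instance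

def pvWitness_solution : String × String × Int := ("ayz", "by", 5)

def Spec_solution (s : String) (skip : String) (index : Int) (out : String) : Prop := out = solution_alt s skip index
instance (s : String) (skip : String) (index : Int) (out : String) : Decidable (Spec_solution s skip index out) := by unfold Spec_solution; infer_instance

-- ===== CLAIM (what is proved, stated in full; the proofs are below) =====
def Claim_equal_solution : Prop := ∀ (s : String) (skip : String) (index : Int), Dom_solution s skip index → Pre_solution s skip index → Spec_solution s skip index (solution s skip index)

-- ===== LEMMAS AND PROOFS =====

theorem pv_toNat_ofNat {n : Nat} (h : n ≤ 122) : (Char.ofNat n).toNat = n := by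
  unfold Char.ofNat
  split
  · rfl
  · rename_i hv; exact absurd (Or.inl (by omega)) hv

theorem pv_bridge (skip : String) (k : Int) (h0 : 0 ≤ k) (h1 : k < 26) :
    ((skip.toList.map (fun char => (char.toNat : Int) - 97)).contains k)
      = (skip.toList.contains (Char.ofNat (k + 97).toNat)) := by
  rw [Bool.eq_iff_iff]
  simp only [List.contains_iff_mem, List.mem_map]
  constructor
  · rintro ⟨c, hc, hck⟩
    have hcn : c.toNat = (k + 97).toNat := by omega
    rwa [← hcn, Char.ofNat_toNat]
  · intro hmem
    refine ⟨_, hmem, ?_⟩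
    have : (k + 97).toNat ≤ 122 := by omega
    rw [pv_toNat_ofNat this]
    omega

theorem pv_mem_allowed (skip : String) (k : Int) :
    k ∈ pvAllowed skip ↔ 0 ≤ k ∧ k < 26 ∧
      ¬ ((skip.toList.map (fun char => (char.toNat : Int) - 97)).contains k = true) := by
  unfold pvAllowed
  simp only [List.mem_filter, PySem.List.mem_pyRange_one]
  constructor
  · rintro ⟨⟨hk0, hk1⟩, hc⟩
    rw [pv_bridge skip k hk0 (by omega)]
    simp_all
  · rintro ⟨hk0, hk1, hc⟩
    rw [pv_bridge skip k hk0 (by omega)] at hc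
    simp_all

theorem pv_allowed_sorted (skip : String) : (pvAllowed skip).Pairwise (· < ·) := by
  exact List.Pairwise.filter _ (PySem.List.pairwise_lt_pyRange_one 0 26)

theorem pv_allowed_nodup (skip : String) : (pvAllowed skip).Nodup :=
  (pv_allowed_sorted skip).nodup

theorem pv_allowed_bounds (skip : String) {k : Int} (h : k ∈ pvAllowed skip) : 0 ≤ k ∧ k < 26 := by
  have := (pv_mem_allowed skip k).mp h
  exact ⟨this.1, this.2.1⟩

theorem pv_rank_getD {l : List Int} (hp : l.Pairwise (· < ·)) {n : Int} (hn : n ∈ l) :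
    l.getD (l.filter (fun k => k < n)).length 0 = n := by
  induction l with
  | nil => simp at hn
  | cons a t ih =>
    rcases List.pairwise_cons.mp hp with ⟨ha, ht⟩
    rcases List.mem_cons.mp hn with rfl | hnt
    · have : ∀ k ∈ n :: t, ¬ (k < n) := by
        intro k hk
        rcases List.mem_cons.mp hk with rfl | hkt
        · omega
        · have := ha k hkt; omega
      rw [List.filter_eq_nil_iff.mpr (by intro k hk; simpa using this k hk)]
      rfl
    · have han : a < n := ha n hnt
      have : (a :: t).filter (fun k => k < n) = a :: t.filter (fun k => k < n) := by
        simp [han]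
      rw [this]
      simpa using ih ht hnt

theorem pv_count_le_succ {l : List Int} (hnd : l.Nodup) (c : Int) :
    (l.filter (fun k => k ≤ c + 1)).length
      = (l.filter (fun k => k ≤ c)).length + (if (c + 1) ∈ l then 1 else 0) := by
  induction l with
  | nil => simp
  | cons a t ih =>
    rcases List.nodup_cons.mp hnd with ⟨hat, hnt⟩
    have iht := ih hnt
    simp only [List.filter_cons, List.mem_cons]
    by_cases hac : a = c + 1
    · have hmt : c + 1 ∉ t := by rw [← hac]; exact hat
      subst hac
      simp only [hmt, or_false]
      rw [if_pos (by simp), if_neg (by simp)]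
      simp [iht, hmt]
    · by_cases hle : a ≤ c
      · rw [if_pos (by simp; omega), if_pos (by simpa using hle)]
        simp only [iht, List.length_cons]
        have : ¬ (c + 1 = a) := fun h => hac h.symm
        simp only [this, false_or]
        omega
      · rw [if_neg (by simp; omega), if_neg (by simpa using hle)]
        have : ¬ (c + 1 = a) := fun h => hac h.symm
        simp only [this, false_or]
        exact iht

theorem pv_mod26 (x : Int) : PySem.Int.mod x 26 = x % 26 :=
  PySem.Int.mod_eq_emod_of_pos (by norm_num)

theorem pv_C1 (skip : String) (c0 : Int) (h0 : 0 ≤ c0) (h1 : c0 < 26)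
    (hn : PySem.Int.mod (c0 + 1) 26 ∈ pvAllowed skip) :
    (pvAllowed skip).getD
      (((pvAllowed skip).filter (fun k => k ≤ c0)).length % (pvAllowed skip).length) 0
      = PySem.Int.mod (c0 + 1) 26 := by
  rw [pv_mod26] at *
  by_cases hc : c0 < 25
  · have hmod : (c0 + 1) % 26 = c0 + 1 := Int.emod_eq_of_lt (by omega) (by omega)
    rw [hmod] at hn ⊢
    have hfe : (pvAllowed skip).filter (fun k => k ≤ c0) = (pvAllowed skip).filter (fun k => k < c0 + 1) := by
      apply List.filter_congr
      intro k _
      simp only [decide_eq_decide]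
      omega
    have hlt : ((pvAllowed skip).filter (fun k => k < c0 + 1)).length < (pvAllowed skip).length := by
      apply List.length_filter_lt_length_iff_exists.mpr
      exact ⟨c0 + 1, hn, by simp⟩
    rw [hfe, Nat.mod_eq_of_lt hlt]
    exact pv_rank_getD (pv_allowed_sorted skip) hn
  · have hc25 : c0 = 25 := by omega
    subst hc25
    have hmod : ((25 : Int) + 1) % 26 = 0 := by decide
    rw [hmod] at hn ⊢
    have hfe : (pvAllowed skip).filter (fun k => k ≤ 25) = pvAllowed skip := by
      apply List.filter_eq_self.mpr
      intro k hk
      have := pv_allowed_bounds skip hk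
      simp only [decide_eq_true_eq]
      omega
    have hf0 : (pvAllowed skip).filter (fun k => k < 0) = [] := by
      apply List.filter_eq_nil_iff.mpr
      intro k hk
      have := pv_allowed_bounds skip hk
      simp only [decide_eq_true_eq]
      omega
    rw [hfe, Nat.mod_self]
    have := pv_rank_getD (pv_allowed_sorted skip) hn
    rw [hf0] at this
    exact this

theorem pv_C2 (skip : String) (c0 : Int) (h0 : 0 ≤ c0) (h1 : c0 < 26) :
    ((pvAllowed skip).filter (fun k => k ≤ PySem.Int.mod (c0 + 1) 26)).length % (pvAllowed skip).length
      = (((pvAllowed skip).filter (fun k => k ≤ c0)).length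
          + (if PySem.Int.mod (c0 + 1) 26 ∈ pvAllowed skip then 1 else 0)) % (pvAllowed skip).length := by
  rw [pv_mod26] at *
  by_cases hc : c0 < 25
  · have hmod : (c0 + 1) % 26 = c0 + 1 := Int.emod_eq_of_lt (by omega) (by omega)
    rw [hmod]
    rw [pv_count_le_succ (pv_allowed_nodup skip) c0]
  · have hc25 : c0 = 25 := by omega
    subst hc25
    have hmod : ((25 : Int) + 1) % 26 = 0 := by decide
    rw [hmod]
    have h1' : (pvAllowed skip).filter (fun k => k ≤ 0) = (pvAllowed skip).filter (fun k => k ≤ (-1) + 1) := by norm_num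
    have h2' : (pvAllowed skip).filter (fun k => k ≤ (-1 : Int)) = [] := by
      apply List.filter_eq_nil_iff.mpr
      intro k hk
      have := pv_allowed_bounds skip hk
      simp only [decide_eq_true_eq]
      omega
    have hfe : (pvAllowed skip).filter (fun k => k ≤ 25) = pvAllowed skip := by
      apply List.filter_eq_self.mpr
      intro k hk
      have := pv_allowed_bounds skip hk
      simp only [decide_eq_true_eq]
      omega
    rw [h1', pv_count_le_succ (pv_allowed_nodup skip) (-1), h2', hfe]
    simp only [List.length_nil, Nat.zero_add]
    norm_num

theorem pv_reach (skip : String) (hne : pvAllowed skip ≠ []) (c : Int) :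
    ∃ t : Nat, t ≤ 25 ∧ PySem.Int.mod (c + 1 + t) 26 ∈ pvAllowed skip := by
  obtain ⟨a, ha⟩ := List.exists_mem_of_ne_nil _ hne
  obtain ⟨ha0, ha1⟩ := pv_allowed_bounds skip ha
  refine ⟨((a - c - 1) % 26).toNat, ?_, ?_⟩
  · have h1 : (a - c - 1) % 26 < 26 := Int.emod_lt_of_pos _ (by norm_num)
    have h2 : 0 ≤ (a - c - 1) % 26 := Int.emod_nonneg _ (by norm_num)
    omega
  · rw [pv_mod26]
    have h2 : 0 ≤ (a - c - 1) % 26 := Int.emod_nonneg _ (by norm_num)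
    have h3 : (c + 1 + ((a - c - 1) % 26).toNat) % 26 = a := by omega
    rw [h3]
    exact ha

theorem pv_loop_done (skipList : List Int) (index : Int) (fuel : Nat) (mc c : Int)
    (h : ¬ mc < index) : pvALoop skipList index fuel mc c = c := by
  cases fuel <;> simp [pvALoop, h]

theorem pv_mod_mod (c : Int) : PySem.Int.mod (PySem.Int.mod c 26 + 1) 26 = PySem.Int.mod (c + 1) 26 := by
  simp only [pv_mod26]
  omega

theorem pv_L1 (skip : String) (index : Int) : ∀ (fuel : Nat) (mc c : Int), mc < index →
    (∃ t : Nat, t ≤ 25 ∧ PySem.Int.mod (c + 1 + t) 26 ∈ pvAllowed skip ∧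
      26 * ((index - mc).toNat - 1) + t + 1 ≤ fuel) →
    pvALoop (skip.toList.map (fun char => (char.toNat : Int) - 97)) index fuel mc c
      = (pvAllowed skip).getD
          ((((pvAllowed skip).filter (fun k => k ≤ PySem.Int.mod c 26)).length
              + ((index - mc).toNat - 1)) % (pvAllowed skip).length) 0 := by
  intro fuel
  induction fuel with
  | zero =>
    rintro mc c hmc ⟨t, ht25, htmem, htfuel⟩
    omega
  | succ f ih =>
    rintro mc c hmc ⟨t, ht25, htmem, htfuel⟩
    have hne : pvAllowed skip ≠ [] := List.ne_nil_of_mem htmem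
    have hm : 0 < (pvAllowed skip).length := List.length_pos_of_ne_nil hne
    set n := PySem.Int.mod (c + 1) 26 with hn
    have hn0 : 0 ≤ n := by rw [hn, pv_mod26]; exact Int.emod_nonneg _ (by norm_num)
    have hn1 : n < 26 := by rw [hn, pv_mod26]; exact Int.emod_lt_of_pos _ (by norm_num)
    have hc0 : 0 ≤ PySem.Int.mod c 26 := by rw [pv_mod26]; exact Int.emod_nonneg _ (by norm_num)
    have hc1 : PySem.Int.mod c 26 < 26 := by rw [pv_mod26]; exact Int.emod_lt_of_pos _ (by norm_num)
    have hnn : PySem.Int.mod (PySem.Int.mod c 26 + 1) 26 = n := pv_mod_mod c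
    by_cases hmem : n ∈ pvAllowed skip
    · have hcont : (skip.toList.map (fun char => (char.toNat : Int) - 97)).contains
          (PySem.Int.mod (c + 1) 26) = false := by
        have h := (pv_mem_allowed skip n).mp hmem
        rw [← hn]
        simpa using h.2.2
      simp only [pvALoop, if_pos hmc]
      rw [if_neg (by simp only [hcont]; simp), ← hn]
      by_cases hend : index ≤ mc + 1
      · have hstop : ¬ (mc + 1 < index) := by omega
        rw [pv_loop_done _ _ _ _ _ hstop]
        have hr : (index - mc).toNat - 1 = 0 := by omega
        rw [hr, Nat.add_zero]
        have h := pv_C1 skip (PySem.Int.mod c 26) hc0 hc1 (by rw [hnn]; exact hmem)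
        rw [hnn] at h
        exact h.symm
      · obtain ⟨t', ht'25, ht'mem⟩ := pv_reach skip hne n
        rw [ih (mc + 1) n (by omega) ⟨t', ht'25, ht'mem, by omega⟩]
        have hmodn : PySem.Int.mod n 26 = n := by
          rw [pv_mod26]; exact Int.emod_eq_of_lt hn0 hn1
        rw [hmodn]
        have hC2 := pv_C2 skip (PySem.Int.mod c 26) hc0 hc1
        rw [hnn, if_pos hmem] at hC2
        have hmeq : Nat.ModEq (pvAllowed skip).length
            (((pvAllowed skip).filter (fun k => k ≤ n)).length)
            (((pvAllowed skip).filter (fun k => k ≤ PySem.Int.mod c 26)).length + 1) := hC2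
        have h1 := Nat.ModEq.add_right ((index - (mc + 1)).toNat - 1) hmeq
        have hr : (index - mc).toNat - 1 = ((index - (mc + 1)).toNat - 1) + 1 := by omega
        refine congrArg (fun i => (pvAllowed skip).getD i 0) ?_
        rw [hr]
        have h2 : ((pvAllowed skip).filter (fun k => k ≤ PySem.Int.mod c 26)).length + 1
              + ((index - (mc + 1)).toNat - 1)
            = ((pvAllowed skip).filter (fun k => k ≤ PySem.Int.mod c 26)).length
              + (((index - (mc + 1)).toNat - 1) + 1) := by omega
        rw [← h2]
        exact h1
    · have hcont : (skip.toList.map (fun char => (char.toNat : Int) - 97)).contains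
          (PySem.Int.mod (c + 1) 26) = true := by
        by_contra hc
        refine hmem ((pv_mem_allowed skip n).mpr ⟨hn0, hn1, ?_⟩)
        rw [← hn] at hc
        simpa using hc
      simp only [pvALoop, if_pos hmc]
      rw [if_pos hcont, ← hn]
      have ht1 : 1 ≤ t := by
        rcases Nat.eq_zero_or_pos t with h0 | h1
        · subst h0
          simp only [Nat.cast_zero, Int.add_zero] at htmem
          exact absurd htmem hmem
        · exact h1
      have hstep : PySem.Int.mod (n + 1 + ((t - 1 : Nat) : Int)) 26 = PySem.Int.mod (c + 1 + (t : Int)) 26 := by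
        simp only [hn, pv_mod26]
        have hcast : ((t - 1 : Nat) : Int) = (t : Int) - 1 := by omega
        rw [hcast]
        omega
      rw [ih mc n hmc ⟨t - 1, by omega, by rw [hstep]; exact htmem, by omega⟩]
      have hmodn : PySem.Int.mod n 26 = n := by
        rw [pv_mod26]; exact Int.emod_eq_of_lt hn0 hn1
      rw [hmodn]
      have hC2 := pv_C2 skip (PySem.Int.mod c 26) hc0 hc1
      rw [hnn, if_neg hmem, Nat.add_zero] at hC2
      have hmeq : Nat.ModEq (pvAllowed skip).length
          (((pvAllowed skip).filter (fun k => k ≤ n)).length)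
          (((pvAllowed skip).filter (fun k => k ≤ PySem.Int.mod c 26)).length) := hC2
      exact congrArg (fun i => (pvAllowed skip).getD i 0)
        (Nat.ModEq.add_right ((index - mc).toNat - 1) hmeq)

theorem pv_foldl_map {α β : Type} (f : α → β) (l : List α) (acc : List β) :
    l.foldl (fun acc x => acc ++ [f x]) acc = acc ++ l.map f := by
  induction l generalizing acc with
  | nil => simp
  | cons a t ih => simp [List.foldl, ih]

theorem pv_pre_ne (skip : String) (h : ∃ k ∈ List.range 26, Char.ofNat (97 + k) ∉ skip.toList) :
    pvAllowed skip ≠ [] := by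
  obtain ⟨k, hk, hmem⟩ := h
  have hk26 : k < 26 := List.mem_range.mp hk
  apply List.ne_nil_of_mem (a := (k : Int))
  unfold pvAllowed
  rw [List.mem_filter]
  constructor
  · rw [PySem.List.mem_pyRange_one]; omega
  · have hcast : ((k : Int) + 97).toNat = 97 + k := by omega
    rw [hcast]
    simpa using hmem

theorem pv_idx_eq (cnt m : Nat) (index : Int) (hm : 0 < m) (hidx : 1 ≤ index) :
    (PySem.Int.mod ((cnt : Int) + index - 1) (m : Int)).toNat = (cnt + (index.toNat - 1)) % m := by
  rw [PySem.Int.mod_eq_emod_of_pos (by exact_mod_cast hm)]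
  have hcast : (cnt : Int) + index - 1 = ((cnt + (index.toNat - 1) : Nat) : Int) := by omega
  rw [hcast, ← Int.natCast_mod]
  exact Int.toNat_natCast _

theorem pv_main (s skip : String) (index : Int)
    (hpre : index ≤ 0 ∨ ∃ k ∈ List.range 26, Char.ofNat (97 + k) ∉ skip.toList) :
    solution s skip index = solution_alt s skip index := by
  by_cases hidx : index ≤ 0
  · unfold solution solution_alt
    rw [if_pos hidx]
    show String.ofList (s.toList.foldl (fun acc char =>
        acc ++ [Char.ofNat (pvALoop (skip.toList.map (fun char => (char.toNat : Int) - 97)) index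
          (26 * index + 26).toNat 0 ((char.toNat : Int) - 97) + 97).toNat]) []) = s
    rw [pv_foldl_map, List.nil_append]
    have hmap : ∀ ch ∈ s.toList,
        Char.ofNat (pvALoop (skip.toList.map (fun char => (char.toNat : Int) - 97)) index
          (26 * index + 26).toNat 0 ((ch.toNat : Int) - 97) + 97).toNat = ch := by
      intro ch _
      rw [pv_loop_done _ _ _ _ _ (by omega)]
      have hcast : ((ch.toNat : Int) - 97 + 97).toNat = ch.toNat := by omega
      rw [hcast, Char.ofNat_toNat]
    calc String.ofList (s.toList.map (fun ch =>
            Char.ofNat (pvALoop (skip.toList.map (fun char => (char.toNat : Int) - 97)) index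
              (26 * index + 26).toNat 0 ((ch.toNat : Int) - 97) + 97).toNat))
        = String.ofList (s.toList.map id) := congrArg _ (List.map_congr_left hmap)
      _ = s := by simp
  · have hpre' : ∃ k ∈ List.range 26, Char.ofNat (97 + k) ∉ skip.toList := by tauto
    have hne := pv_pre_ne skip hpre'
    have hm : 0 < (pvAllowed skip).length := List.length_pos_of_ne_nil hne
    unfold solution solution_alt
    rw [if_neg hidx]
    show String.ofList (s.toList.foldl (fun acc char =>
        acc ++ [Char.ofNat (pvALoop (skip.toList.map (fun char => (char.toNat : Int) - 97)) index
          (26 * index + 26).toNat 0 ((char.toNat : Int) - 97) + 97).toNat]) [])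
      = String.ofList (s.toList.map (fun ch =>
          Char.ofNat ((pvAllowed skip).getD (PySem.Int.mod
            ((((pvAllowed skip).filter (fun k => k ≤ PySem.Int.mod ((ch.toNat : Int) - 97) 26)).length : Int)
              + index - 1) ((pvAllowed skip).length : Int)).toNat 0 + 97).toNat))
    rw [pv_foldl_map, List.nil_append]
    refine congrArg String.ofList (List.map_congr_left ?_)
    intro ch _
    obtain ⟨t, ht25, htmem⟩ := pv_reach skip hne ((ch.toNat : Int) - 97)
    rw [pv_L1 skip index (26 * index + 26).toNat 0 ((ch.toNat : Int) - 97) (by omega)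
      ⟨t, ht25, htmem, by omega⟩]
    rw [pv_idx_eq _ _ index hm (by omega)]
    rw [show index - 0 = index from by ring]

-- ===== VERDICT (by name: the statement is the Claim_ definition above) =====
theorem solution_spec : Claim_equal_solution := by
  intro s skip index _hdom hpre
  exact pv_main s skip index hpre
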